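-- pv_equiv track=rewrite | github.com/lbugnon/sincfold_utils | src/sincfold_utils/metrics.py | get_tp
-- ===== SOURCE A (Python) =====
-- def get_tp(bp_x, bp_ref, strict):
--     tp = 0
--     for rbp in bp_x:
--         cond = rbp in bp_ref
--         if not strict:
--             cond = cond or [rbp[0], rbp[1] - 1] in bp_ref or [rbp[0], rbp[1] + 1] in bp_ref or [rbp[0] + 1, rbp[1]] in bp_ref or [rbp[0] - 1, rbp[1]] in bp_ref
--         if cond:
--             tp += 1
--     return tp
-- ===== SOURCE B (Python) =====
-- def get_tp(bp_x, bp_ref, strict):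
--     # sort-merge join: emit up to 5 probe keys per candidate pair, sort them,
--     # sweep once against the sorted distinct references, count distinct hit ids
--     probes = []
--     for q, x in enumerate(bp_x):
--         probes.append((tuple(x), q))
--         if not strict and len(x) >= 2:
--             a, b = x[0], x[1]
--             probes.append(((a, b - 1), q))
--             probes.append(((a, b + 1), q))
--             probes.append(((a + 1, b), q))
--             probes.append(((a - 1, b), q))
--     probes.sort(key=lambda p: p[0])
--     refs = sorted(set(map(tuple, bp_ref)))
--     hits = set()
--     i = j = 0
--     while i < len(probes) and j < len(refs):
--         k = probes[i][0]
--         if k == refs[j]: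
--             hits.add(probes[i][1])
--             i += 1
--         elif k < refs[j]:
--             i += 1
--         else:
--             j += 1
--     return len(hits)
-- ===== Notes on version B (the rewrite author's own statement) =====
-- stated objective: alternative
-- what changed: B is a sort-merge join: it emits up to five tagged probe keys per bp_x element (the element itself plus, when not strict, its four one-off shifted pairs), sorts the probes and the distinct references, sweeps both sorted lists once with two pointers and returns the number of distinct hit ids, instead of A's up-to-five inline list-membership scans per element.
import Mathlib
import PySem

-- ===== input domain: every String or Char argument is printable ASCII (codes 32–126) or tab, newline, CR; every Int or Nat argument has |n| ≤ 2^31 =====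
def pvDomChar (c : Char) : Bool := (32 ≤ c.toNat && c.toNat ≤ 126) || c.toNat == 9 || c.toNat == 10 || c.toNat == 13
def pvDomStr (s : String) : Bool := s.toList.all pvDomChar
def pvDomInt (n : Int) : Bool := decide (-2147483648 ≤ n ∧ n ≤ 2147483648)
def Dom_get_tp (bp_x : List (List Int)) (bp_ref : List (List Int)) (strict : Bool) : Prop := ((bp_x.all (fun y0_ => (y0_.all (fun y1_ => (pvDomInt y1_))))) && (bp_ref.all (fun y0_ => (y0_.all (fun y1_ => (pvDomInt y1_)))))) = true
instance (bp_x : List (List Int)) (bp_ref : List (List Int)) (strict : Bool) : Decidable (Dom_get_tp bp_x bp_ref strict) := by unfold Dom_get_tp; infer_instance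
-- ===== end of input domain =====

-- B replaces A's per-element membership scans by a sort-merge join: it emits up to five tagged
-- probe keys per candidate pair, sorts them, sweeps once against the sorted distinct references
-- and counts the distinct hit ids (objective: alternative).

-- ===== PORT A =====
def get_tp (bp_x : List (List Int)) (bp_ref : List (List Int)) (strict : Bool) : Int :=
  bp_x.foldl (fun tp rbp =>
    let cond := bp_ref.contains rbp
    let cond := if strict then cond
      else cond ||
        (match PySem.List.pyGet? rbp 0, PySem.List.pyGet? rbp 1 with
         | some a, some b =>
             bp_ref.contains [a, b - 1] || bp_ref.contains [a, b + 1] ||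
             bp_ref.contains [a + 1, b] || bp_ref.contains [a - 1, b]
         | _, _ => false)   -- Python raises IndexError here; excluded by Pre_get_tp
    if cond then tp + 1 else tp) 0

-- ===== PORT B =====
-- the shifted probes of one element: in non-strict mode, its four one-off neighbour pairs
-- (none when it has fewer than two entries — Source B's len(x) >= 2 guard)
def getTpShifts (strict : Bool) (x : List Int) (q : Int) : List (List Int × Int) :=
  if strict then []
  else match x with
    | a :: b :: _ => [([a, b - 1], q), ([a, b + 1], q), ([a + 1, b], q), ([a - 1, b], q)]
    | _ => []

-- probe generation: for the q-th element x, the key x itself plus its shifted probes, tagged q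
def getTpProbes (bp_x : List (List Int)) (strict : Bool) (q : Int) : List (List Int × Int) :=
  match bp_x with
  | [] => []
  | x :: xs => ((x, q) :: getTpShifts strict x q) ++ getTpProbes xs strict (q + 1)

-- the two-pointer sweep of Source B's while loop: advance the smaller side, record hit ids
-- (fuel = a structural bound on the number of loop steps; it only makes the recursion total)
def getTpMergeF (fuel : Nat) (ps : List (List Int × Int)) (rs : List (List Int)) (hits : PySem.Set Int) : PySem.Set Int :=
  match fuel, ps, rs with
  | 0, _, _ => hits
  | fuel + 1, (k, q) :: ps', r :: rs' =>
      if k = r then getTpMergeF fuel ps' (r :: rs') (hits.add q)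
      else if k < r then getTpMergeF fuel ps' (r :: rs') hits
      else getTpMergeF fuel ((k, q) :: ps') rs' hits
  | _ + 1, _, _ => hits

def getTpMerge (ps : List (List Int × Int)) (rs : List (List Int)) (hits : PySem.Set Int) : PySem.Set Int :=
  getTpMergeF (ps.length + rs.length) ps rs hits

def get_tp_alt (bp_x : List (List Int)) (bp_ref : List (List Int)) (strict : Bool) : Int :=
  let probes := PySem.List.sorted (getTpProbes bp_x strict 0) (fun p => p.1)
  let refs := PySem.List.sorted (PySem.Set.ofList bp_ref) (fun r => r)
  PySem.Set.len (getTpMerge probes refs PySem.Set.empty)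

-- ===== PRECONDITION & SPEC =====
-- Pre_ excludes exactly the inputs where Python A raises IndexError: in non-strict mode,
-- an element of bp_x that is not an exact reference match and has fewer than two entries.
def Pre_get_tp (bp_x : List (List Int)) (bp_ref : List (List Int)) (strict : Bool) : Prop :=
  strict = true ∨ ∀ rbp ∈ bp_x, rbp ∈ bp_ref ∨ 2 ≤ rbp.length
instance (bp_x : List (List Int)) (bp_ref : List (List Int)) (strict : Bool) : Decidable (Pre_get_tp bp_x bp_ref strict) := by unfold Pre_get_tp; infer_instance
def pvWitness_get_tp : List (List Int) × List (List Int) × Bool := ([[1, 2], [3, 5]], [[1, 3], [3, 5]], false)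

def Spec_get_tp (bp_x : List (List Int)) (bp_ref : List (List Int)) (strict : Bool) (out : Int) : Prop := out = get_tp_alt bp_x bp_ref strict
instance (bp_x : List (List Int)) (bp_ref : List (List Int)) (strict : Bool) (out : Int) : Decidable (Spec_get_tp bp_x bp_ref strict out) := by unfold Spec_get_tp; infer_instance

-- ===== CLAIM (what is proved, stated in full; the proofs are below) =====
def Claim_equal_get_tp : Prop := ∀ (bp_x : List (List Int)) (bp_ref : List (List Int)) (strict : Bool), Dom_get_tp bp_x bp_ref strict → Pre_get_tp bp_x bp_ref strict → Spec_get_tp bp_x bp_ref strict (get_tp bp_x bp_ref strict)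

-- ===== LEMMAS AND PROOFS =====

-- the per-element condition A tests, as a boolean predicate
def condA (bp_ref : List (List Int)) (strict : Bool) (x : List Int) : Bool :=
  bp_ref.contains x ||
    (!strict &&
      (match x with
       | a :: b :: _ =>
           bp_ref.contains [a, b - 1] || bp_ref.contains [a, b + 1] ||
           bp_ref.contains [a + 1, b] || bp_ref.contains [a - 1, b]
       | _ => false))

-- A's fold counts condA
theorem getTp_eq_countP (bp_x bp_ref : List (List Int)) (strict : Bool) :
    get_tp bp_x bp_ref strict = (bp_x.countP (condA bp_ref strict) : Int) := by
  have gen : ∀ (l : List (List Int)) (tp : Int),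
      l.foldl (fun tp rbp =>
        let cond := bp_ref.contains rbp
        let cond := if strict then cond
          else cond ||
            (match PySem.List.pyGet? rbp 0, PySem.List.pyGet? rbp 1 with
             | some a, some b =>
                 bp_ref.contains [a, b - 1] || bp_ref.contains [a, b + 1] ||
                 bp_ref.contains [a + 1, b] || bp_ref.contains [a - 1, b]
             | _, _ => false)
        if cond then tp + 1 else tp) tp = tp + (l.countP (condA bp_ref strict) : Int) := by
    intro l
    induction l with
    | nil => intro tp; simp
    | cons x t ih =>
      intro tp
      rw [List.foldl_cons, ih, List.countP_cons]
      have hc : (let cond := bp_ref.contains x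
        let cond := if strict then cond
          else cond ||
            (match PySem.List.pyGet? x 0, PySem.List.pyGet? x 1 with
             | some a, some b =>
                 bp_ref.contains [a, b - 1] || bp_ref.contains [a, b + 1] ||
                 bp_ref.contains [a + 1, b] || bp_ref.contains [a - 1, b]
             | _, _ => false)
        cond) = condA bp_ref strict x := by
        cases strict with
        | true => simp [condA]
        | false =>
          rcases x with _ | ⟨a, rest⟩
          · simp [condA, PySem.List.pyGet?, PySem.List.pyIdx?]
          rcases rest with _ | ⟨b, t'⟩
          · simp [condA, PySem.List.pyGet?, PySem.List.pyIdx?]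
          have h0 : PySem.List.pyGet? (a :: b :: t') 0 = some a := by simp
          have h1 : PySem.List.pyGet? (a :: b :: t') 1 = some b := by simp
          simp only [h0, h1, condA, Bool.not_false, Bool.true_and, Bool.false_eq_true, if_false]
      simp only [hc]
      cases h : condA bp_ref strict x <;> simp [h] <;> ring
  rw [get_tp, gen]; ring

-- each (probe key, id) group of one element hits the references iff A's condition holds there
theorem head_group (bp_ref : List (List Int)) (strict : Bool) (refs : List (List Int))
    (href : ∀ k : List Int, k ∈ refs ↔ k ∈ bp_ref) (x : List Int) (q0 q : Int) :
    (∃ k, (k, q) ∈ ((x, q0) :: getTpShifts strict x q0) ∧ k ∈ refs) ↔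
      (q = q0 ∧ condA bp_ref strict x = true) := by
  cases strict with
  | true =>
    simp [getTpShifts, condA, href, List.contains_eq_mem, eq_comm, and_comm]
  | false =>
    rcases x with _ | ⟨a, rest⟩
    · simp [getTpShifts, condA, href, List.contains_eq_mem, eq_comm, and_comm]
    rcases rest with _ | ⟨b, t⟩
    · simp [getTpShifts, condA, href, List.contains_eq_mem, eq_comm, and_comm]
    simp only [getTpShifts, Bool.false_eq_true, if_false]
    constructor
    · rintro ⟨k, hk, hr⟩
      have hkb := (href k).1 hr
      simp only [List.mem_cons, List.not_mem_nil, or_false, Prod.mk.injEq] at hk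
      rcases hk with h | h | h | h | h <;> obtain ⟨rfl, rfl⟩ := h <;>
        exact ⟨rfl, by simp [condA, List.contains_eq_mem, hkb]⟩
    · rintro ⟨hq, hc⟩
      subst hq
      simp only [condA, Bool.not_false, Bool.true_and, Bool.or_eq_true,
        List.contains_eq_mem, decide_eq_true_eq] at hc
      rcases hc with h | (((h | h) | h) | h)
      · exact ⟨a :: b :: t, by simp, (href _).2 h⟩
      · exact ⟨[a, b - 1], by simp, (href _).2 h⟩
      · exact ⟨[a, b + 1], by simp, (href _).2 h⟩
      · exact ⟨[a + 1, b], by simp, (href _).2 h⟩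
      · exact ⟨[a - 1, b], by simp, (href _).2 h⟩

-- id q has a hitting probe iff A's condition holds at position q
theorem mem_probes (bp_ref : List (List Int)) (strict : Bool) (refs : List (List Int))
    (href : ∀ k : List Int, k ∈ refs ↔ k ∈ bp_ref) (bp_x : List (List Int)) :
    ∀ (q0 q : Int),
    (∃ k, (k, q) ∈ getTpProbes bp_x strict q0 ∧ k ∈ refs) ↔
      (∃ i : Nat, i < bp_x.length ∧ q = q0 + i ∧ condA bp_ref strict (bp_x.getD i []) = true) := by
  induction bp_x with
  | nil => intro q0 q; simp [getTpProbes]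
  | cons x xs ih =>
    intro q0 q
    rw [getTpProbes]
    have hsplit : (∃ k, (k, q) ∈ (((x, q0) :: getTpShifts strict x q0) ++ getTpProbes xs strict (q0 + 1)) ∧ k ∈ refs) ↔
        ((q = q0 ∧ condA bp_ref strict x = true) ∨
         (∃ i : Nat, i < xs.length ∧ q = (q0 + 1) + i ∧ condA bp_ref strict (xs.getD i []) = true)) := by
      rw [← head_group bp_ref strict refs href x q0 q, ← ih (q0 + 1) q]
      constructor
      · rintro ⟨k, hk, hr⟩
        rcases List.mem_append.1 hk with h | h
        · exact Or.inl ⟨k, h, hr⟩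
        · exact Or.inr ⟨k, h, hr⟩
      · rintro (⟨k, hk, hr⟩ | ⟨k, hk, hr⟩)
        · exact ⟨k, List.mem_append.2 (Or.inl hk), hr⟩
        · exact ⟨k, List.mem_append.2 (Or.inr hk), hr⟩
    rw [hsplit]
    constructor
    · rintro (⟨rfl, hc⟩ | ⟨i, hi, hq, hc⟩)
      · exact ⟨0, by simp, by simp, by simpa using hc⟩
      · exact ⟨i + 1, by simpa using hi, by push_cast at hq ⊢; omega, by simpa using hc⟩
    · rintro ⟨i, hi, hq, hc⟩
      cases i with
      | zero => exact Or.inl ⟨by simpa using hq, by simpa using hc⟩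
      | succ i =>
        exact Or.inr ⟨i, by simpa using hi, by push_cast at hq ⊢; omega, by simpa using hc⟩

-- the sweep collects exactly the ids with a hitting probe (given both sides sorted)
theorem mem_mergeF (fuel : Nat) : ∀ (ps : List (List Int × Int)) (rs : List (List Int)) (hits : PySem.Set Int),
    ps.length + rs.length ≤ fuel →
    ps.Pairwise (fun p p' => p.1 ≤ p'.1) → rs.Pairwise (· < ·) → ∀ q : Int,
    (q ∈ getTpMergeF fuel ps rs hits ↔ q ∈ hits ∨ ∃ k, (k, q) ∈ ps ∧ k ∈ rs) := by
  induction fuel with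
  | zero =>
    intro ps rs hits hf _ _ q
    have hps : ps = [] := List.eq_nil_of_length_eq_zero (by omega)
    subst hps
    simp [getTpMergeF]
  | succ fuel ih =>
    intro ps rs hits hf hps hrs q
    rcases ps with _ | ⟨⟨k, q'⟩, ps'⟩
    · simp [getTpMergeF]
    rcases rs with _ | ⟨r, rs'⟩
    · simp [getTpMergeF]
    show q ∈ (if k = r then getTpMergeF fuel ps' (r :: rs') (hits.add q')
      else if k < r then getTpMergeF fuel ps' (r :: rs') hits
      else getTpMergeF fuel ((k, q') :: ps') rs' hits) ↔ _
    simp only [List.length_cons] at hf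
    by_cases hkr : k = r
    · subst hkr
      rw [if_pos rfl]
      rw [ih ps' (k :: rs') (hits.add q') (by simp only [List.length_cons]; omega) hps.tail hrs q]
      simp only [PySem.Set.mem_add]
      constructor
      · rintro ((h | h) | ⟨k', hk', hr'⟩)
        · exact Or.inl h
        · exact Or.inr ⟨k, List.mem_cons.2 (Or.inl (by simp [h])), by simp⟩
        · exact Or.inr ⟨k', List.mem_cons_of_mem _ hk', hr'⟩
      · rintro (h | ⟨k', hk', hr'⟩)
        · exact Or.inl (Or.inl h)
        · rcases List.mem_cons.1 hk' with h' | h'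
          · simp only [Prod.mk.injEq] at h'
            exact Or.inl (Or.inr h'.2)
          · exact Or.inr ⟨k', h', hr'⟩
    · rw [if_neg hkr]
      by_cases hlt : k < r
      · rw [if_pos hlt]
        rw [ih ps' (r :: rs') hits (by simp only [List.length_cons]; omega) hps.tail hrs q]
        constructor
        · rintro (h | ⟨k', hk', hr'⟩)
          · exact Or.inl h
          · exact Or.inr ⟨k', List.mem_cons_of_mem _ hk', hr'⟩
        · rintro (h | ⟨k', hk', hr'⟩)
          · exact Or.inl h
          · rcases List.mem_cons.1 hk' with h' | h'
            · exfalso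
              simp only [Prod.mk.injEq] at h'
              obtain ⟨rfl, rfl⟩ := h'
              rcases List.mem_cons.1 hr' with h'' | h''
              · exact hkr h''
              · exact absurd (hlt.trans (List.rel_of_pairwise_cons hrs h'')) (lt_irrefl _)
            · exact Or.inr ⟨k', h', hr'⟩
      · rw [if_neg hlt]
        have hrk : r < k := lt_of_le_of_ne (not_lt.1 hlt) (fun h => hkr h.symm)
        rw [ih ((k, q') :: ps') rs' hits (by simp only [List.length_cons]; omega) hps hrs.tail q]
        constructor
        · rintro (h | ⟨k', hk', hr'⟩)
          · exact Or.inl h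
          · exact Or.inr ⟨k', hk', List.mem_cons_of_mem _ hr'⟩
        · rintro (h | ⟨k', hk', hr'⟩)
          · exact Or.inl h
          · rcases List.mem_cons.1 hr' with h' | h'
            · exfalso
              subst h'
              rcases List.mem_cons.1 hk' with h'' | h''
              · simp only [Prod.mk.injEq] at h''
                exact hkr h''.1.symm
              · have hle : k ≤ k' := List.rel_of_pairwise_cons hps h''
                exact absurd (hrk.trans_le hle) (lt_irrefl _)
            · exact Or.inr ⟨k', hk', h'⟩

theorem mem_merge (ps : List (List Int × Int)) (rs : List (List Int)) (hits : PySem.Set Int)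
    (hps : ps.Pairwise (fun p p' => p.1 ≤ p'.1)) (hrs : rs.Pairwise (· < ·)) (q : Int) :
    q ∈ getTpMerge ps rs hits ↔ q ∈ hits ∨ ∃ k, (k, q) ∈ ps ∧ k ∈ rs :=
  mem_mergeF (ps.length + rs.length) ps rs hits le_rfl hps hrs q

-- the sweep keeps the hit set duplicate-free
theorem nodup_mergeF (fuel : Nat) : ∀ (ps : List (List Int × Int)) (rs : List (List Int))
    (hits : PySem.Set Int), hits.Nodup → (getTpMergeF fuel ps rs hits).Nodup := by
  induction fuel with
  | zero => intro ps rs hits h; simpa [getTpMergeF] using h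
  | succ fuel ih =>
    intro ps rs hits h
    rcases ps with _ | ⟨⟨k, q'⟩, ps'⟩
    · simpa [getTpMergeF] using h
    rcases rs with _ | ⟨r, rs'⟩
    · simpa [getTpMergeF] using h
    show ((if k = r then getTpMergeF fuel ps' (r :: rs') (hits.add q')
      else if k < r then getTpMergeF fuel ps' (r :: rs') hits
      else getTpMergeF fuel ((k, q') :: ps') rs' hits)).Nodup
    split_ifs
    · exact ih _ _ _ (PySem.Set.nodup_add _ _ h)
    · exact ih _ _ _ h
    · exact ih _ _ _ h

theorem nodup_merge (ps : List (List Int × Int)) (rs : List (List Int)) (hits : PySem.Set Int)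
    (h : hits.Nodup) : (getTpMerge ps rs hits).Nodup :=
  nodup_mergeF (ps.length + rs.length) ps rs hits h

-- counting a predicate over positions equals counting it over the list
theorem countP_range (c : List Int → Bool) (xs : List (List Int)) :
    (List.range xs.length).countP (fun i => c (xs.getD i [])) = xs.countP c := by
  induction xs with
  | nil => simp
  | cons x t ih =>
    rw [List.length_cons, List.range_succ_eq_map, List.countP_cons, List.countP_map]
    have : ((fun i => c ((x :: t).getD i [])) ∘ Nat.succ) = (fun i => c (t.getD i [])) := by
      funext i; simp
    rw [this, ih, List.countP_cons]
    simp

-- the port's `sorted` (default List order instances) equals the LinearOrder-instance `sorted`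
theorem sorted_inst_bridge {α : Type} (xs : List α) (key : α → List Int) :
    PySem.List.sorted xs key =
      @PySem.List.sorted α (List Int) List.instLinearOrder.toLT LinearOrder.toDecidableLT xs key false := by
  have h : (fun a b : List Int => a.decidableLT b) =
      (fun a b => @LinearOrder.toDecidableLT _ List.instLinearOrder a b) := by
    funext a b
    exact Subsingleton.elim _ _
  exact congrArg (fun d => @PySem.List.sorted α (List Int) List.instLT d xs key false) h

-- B counts condA too
theorem getTpAlt_eq_countP (bp_x bp_ref : List (List Int)) (strict : Bool) :
    get_tp_alt bp_x bp_ref strict = (bp_x.countP (condA bp_ref strict) : Int) := by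
  simp only [get_tp_alt]
  have href : ∀ k : List Int, k ∈ PySem.List.sorted (PySem.Set.ofList bp_ref) (fun r => r) ↔ k ∈ bp_ref := by
    intro k
    rw [PySem.List.mem_sorted, PySem.Set.mem_ofList]
  have hps : (PySem.List.sorted (getTpProbes bp_x strict 0) (fun p : List Int × Int => p.1)).Pairwise
      (fun p p' => p.1 ≤ p'.1) := by
    rw [sorted_inst_bridge]
    exact PySem.List.sorted_pairwise _ _
  have hrs : (PySem.List.sorted (PySem.Set.ofList bp_ref) (fun r => r)).Pairwise (· < ·) := by
    rw [sorted_inst_bridge]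
    exact PySem.List.sorted_ofList_pairwise_lt bp_ref
  set M := getTpMerge (PySem.List.sorted (getTpProbes bp_x strict 0) (fun p => p.1))
      (PySem.List.sorted (PySem.Set.ofList bp_ref) (fun r => r)) PySem.Set.empty with hM
  have hmem : ∀ q : Int, q ∈ M ↔
      (∃ i : Nat, i < bp_x.length ∧ q = (i : Int) ∧ condA bp_ref strict (bp_x.getD i []) = true) := by
    intro q
    have base := mem_merge _ _ PySem.Set.empty hps hrs q
    constructor
    · intro hq
      rcases base.1 hq with h | ⟨k, hk, hr⟩
      · simp [PySem.Set.empty] at h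
      · have hk' := (PySem.List.mem_sorted _ _ _ _).1 hk
        have := (mem_probes bp_ref strict _ href bp_x 0 q).1 ⟨k, hk', hr⟩
        simpa using this
    · intro h
      have h' : ∃ i : Nat, i < bp_x.length ∧ q = 0 + (i : Int) ∧
          condA bp_ref strict (bp_x.getD i []) = true := by simpa using h
      rcases (mem_probes bp_ref strict _ href bp_x 0 q).2 h' with ⟨k, hk, hr⟩
      exact base.2 (Or.inr ⟨k, (PySem.List.mem_sorted _ _ _ _).2 hk, hr⟩)
  have hnd : M.Nodup := nodup_merge _ _ _ List.nodup_nil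
  set H := ((List.range bp_x.length).filter
      (fun i => condA bp_ref strict (bp_x.getD i []))).map (fun i : Nat => (i : Int)) with hH
  have hndH : H.Nodup := by
    rw [hH]
    exact (List.Nodup.filter _ List.nodup_range).map Nat.cast_injective
  have hHm : ∀ q : Int, q ∈ H ↔ q ∈ M := by
    intro q
    rw [hmem q, hH]
    simp only [List.mem_map, List.mem_filter, List.mem_range]
    constructor
    · rintro ⟨i, ⟨hi, hc⟩, rfl⟩; exact ⟨i, hi, rfl, hc⟩
    · rintro ⟨i, hi, rfl, hc⟩; exact ⟨i, ⟨hi, hc⟩, rfl⟩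
  have hlen : M.length = H.length := by
    rw [← List.toFinset_card_of_nodup hnd, ← List.toFinset_card_of_nodup hndH]
    congr 1
    ext q
    simp only [List.mem_toFinset]
    exact (hHm q).symm
  have hcast : PySem.Set.len M = (M.length : Int) := rfl
  rw [hcast, hlen, hH, List.length_map, ← List.countP_eq_length_filter, countP_range]

-- ===== VERDICT (by name: the statement is the Claim_ definition above) =====
theorem get_tp_spec : Claim_equal_get_tp := by
  intro bp_x bp_ref strict _ _
  unfold Spec_get_tp
  rw [getTp_eq_countP, getTpAlt_eq_countP]
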